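-- pv_equiv track=rewrite | github.com/frankiehot-tech/openclaw | mark_pending_tasks.py | categorize_pending_tasks
-- ===== SOURCE A (Python) =====
-- def categorize_pending_tasks(pending_tasks):
--     """根据任务特征分类"""
--     categories = {
--         "critical_validation": [],  # 关键验证任务
--         "audit_closeout": [],  # 审计收口任务
--         "resource_related": [],  # 资源相关任务
--         "execution_harness": [],  # 执行框架任务
--         "auto_generation": [],  # 自动生成任务
--         "other": [],  # 其他任务
--     }
--
--     for task_id, task_details in pending_tasks:
--         title = task_details.get("title", "").lower()
--         task_details.get("summary", "").lower()
--         task_details.get("stage", "").lower()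
--
--         # 分类逻辑
--         if any(
--             keyword in title
--             for keyword in [
--                 "验证",
--                 "validation",
--                 "审计",
--                 "audit",
--                 "收口",
--                 "closeout",
--                 "风险",
--                 "risk",
--             ]
--         ):
--             categories["critical_validation"].append((task_id, task_details))
--         elif any(keyword in title for keyword in ["审计", "audit", "收口", "closeout"]):
--             categories["audit_closeout"].append((task_id, task_details))
--         elif any(keyword in title for keyword in ["资源", "resource", "内存", "disk", "cpu"]):
--             categories["resource_related"].append((task_id, task_details))
--         elif any(
--             keyword in title for keyword in ["执行", "execution", "框架", "harness", "runner"]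
--         ):
--             categories["execution_harness"].append((task_id, task_details))
--         elif any(keyword in title for keyword in ["自动", "auto", "生成", "generate", "proposal"]):
--             categories["auto_generation"].append((task_id, task_details))
--         else:
--             categories["other"].append((task_id, task_details))
--
--     return categories
-- ===== SOURCE B (Python) =====
-- KEYWORD_TABLE = [
--     ("critical_validation", ["验证", "validation", "审计", "audit", "收口", "closeout", "风险", "risk"]),
--     ("audit_closeout", ["审计", "audit", "收口", "closeout"]),
--     ("resource_related", ["资源", "resource", "内存", "disk", "cpu"]),
--     ("execution_harness", ["执行", "execution", "框架", "harness", "runner"]),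
--     ("auto_generation", ["自动", "auto", "生成", "generate", "proposal"]),
-- ]
--
-- CATEGORY_ORDER = [name for name, _ in KEYWORD_TABLE] + ["other"]
--
--
-- def _label(task_details):
--     title = task_details.get("title", "").lower()
--     for name, keywords in KEYWORD_TABLE:
--         if any(keyword in title for keyword in keywords):
--             return name
--     return "other"
--
--
-- def categorize_pending_tasks(pending_tasks):
--     labeled = [(_label(task_details), (task_id, task_details))
--                for task_id, task_details in pending_tasks]
--     return {name: [item for lbl, item in labeled if lbl == name]
--             for name in CATEGORY_ORDER}
-- ===== Notes on version B (the rewrite author's own statement) =====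
-- stated objective: idiomatic
-- what changed: Replaces the six-way if/elif chain that appends into a mutable dict with a data-driven keyword table: each task is labelled once by scanning the table for the first matching category, and the result dict is built per category by a grouping comprehension over the labelled list (the no-effect summary/stage .get calls are dropped; the always-empty audit_closeout key is kept).
import Mathlib
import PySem

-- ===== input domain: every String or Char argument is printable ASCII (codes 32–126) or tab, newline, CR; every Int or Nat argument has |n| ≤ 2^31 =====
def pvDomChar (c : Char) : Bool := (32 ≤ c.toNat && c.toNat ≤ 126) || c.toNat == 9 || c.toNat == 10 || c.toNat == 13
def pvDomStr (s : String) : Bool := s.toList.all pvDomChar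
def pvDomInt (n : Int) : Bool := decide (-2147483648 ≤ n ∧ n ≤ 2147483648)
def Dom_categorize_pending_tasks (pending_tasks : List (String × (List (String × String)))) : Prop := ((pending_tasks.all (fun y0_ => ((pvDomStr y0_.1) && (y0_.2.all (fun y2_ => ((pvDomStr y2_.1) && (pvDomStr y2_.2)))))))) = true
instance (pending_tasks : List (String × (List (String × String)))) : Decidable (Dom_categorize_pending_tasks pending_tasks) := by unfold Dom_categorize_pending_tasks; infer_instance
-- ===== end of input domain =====

-- B replaces A's if/elif chain appending into a mutable dict by a data-driven keyword table:
-- label each task once, then build each category by a grouping filter (idiomatic, same cost).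


-- ===== PORT A =====
def aKwCritical : List String := ["验证", "validation", "审计", "audit", "收口", "closeout", "风险", "risk"]
def aKwAudit : List String := ["审计", "audit", "收口", "closeout"]
def aKwResource : List String := ["资源", "resource", "内存", "disk", "cpu"]
def aKwExec : List String := ["执行", "execution", "框架", "harness", "runner"]
def aKwAuto : List String := ["自动", "auto", "生成", "generate", "proposal"]

def categorize_pending_tasks (pending_tasks : List (String × (List (String × String)))) : List (String × List (String × (List (String × String)))) :=
  let categories : PySem.Dict String (List (String × List (String × String))) :=
    PySem.Dict.mk [("critical_validation", []), ("audit_closeout", []), ("resource_related", []),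
                   ("execution_harness", []), ("auto_generation", []), ("other", [])]
  let final := pending_tasks.foldl (fun cats p =>
    let title := PySem.Str.lower ((PySem.Dict.mk p.2).getD "title" "")
    if aKwCritical.any (fun keyword => PySem.Str.isIn keyword title) then
      cats.modify "critical_validation" [] (· ++ [p])
    else if aKwAudit.any (fun keyword => PySem.Str.isIn keyword title) then
      cats.modify "audit_closeout" [] (· ++ [p])
    else if aKwResource.any (fun keyword => PySem.Str.isIn keyword title) then
      cats.modify "resource_related" [] (· ++ [p])
    else if aKwExec.any (fun keyword => PySem.Str.isIn keyword title) then
      cats.modify "execution_harness" [] (· ++ [p])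
    else if aKwAuto.any (fun keyword => PySem.Str.isIn keyword title) then
      cats.modify "auto_generation" [] (· ++ [p])
    else
      cats.modify "other" [] (· ++ [p])) categories
  final.items

-- ===== PORT B =====
def bTable : List (String × List String) :=
  [("critical_validation", ["验证", "validation", "审计", "audit", "收口", "closeout", "风险", "risk"]),
   ("audit_closeout", ["审计", "audit", "收口", "closeout"]),
   ("resource_related", ["资源", "resource", "内存", "disk", "cpu"]),
   ("execution_harness", ["执行", "execution", "框架", "harness", "runner"]),
   ("auto_generation", ["自动", "auto", "生成", "generate", "proposal"])]

def bOrder : List String := bTable.map (·.1) ++ ["other"]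

def bScan (title : String) : List (String × List String) → String
  | [] => "other"
  | e :: rest => if e.2.any (fun keyword => PySem.Str.isIn keyword title) then e.1 else bScan title rest

def bLabel (task_details : List (String × String)) : String :=
  bScan (PySem.Str.lower ((PySem.Dict.mk task_details).getD "title" "")) bTable

def categorize_pending_tasks_alt (pending_tasks : List (String × (List (String × String)))) : List (String × List (String × (List (String × String)))) :=
  let labeled := pending_tasks.map (fun p => (bLabel p.2, p))
  bOrder.map (fun name => (name, (labeled.filter (fun q => q.1 == name)).map (·.2)))

-- ===== PRECONDITION & SPEC =====
def Spec_categorize_pending_tasks (pending_tasks : List (String × (List (String × String)))) (out : List (String × List (String × (List (String × String))))) : Prop := out = categorize_pending_tasks_alt pending_tasks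
instance (pending_tasks : List (String × (List (String × String)))) (out : List (String × List (String × (List (String × String))))) : Decidable (Spec_categorize_pending_tasks pending_tasks out) := by unfold Spec_categorize_pending_tasks; infer_instance

-- ===== CLAIM (what is proved, stated in full; the proofs are below) =====
def Claim_equal_categorize_pending_tasks : Prop := ∀ (pending_tasks : List (String × (List (String × String)))), Dom_categorize_pending_tasks pending_tasks → Spec_categorize_pending_tasks pending_tasks (categorize_pending_tasks pending_tasks)

-- ===== LEMMAS AND PROOFS =====

-- the key A's branch chain appends at, as a function of the task details
def aKey (task_details : List (String × String)) : String :=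
  let title := PySem.Str.lower ((PySem.Dict.mk task_details).getD "title" "")
  if aKwCritical.any (fun keyword => PySem.Str.isIn keyword title) then "critical_validation"
  else if aKwAudit.any (fun keyword => PySem.Str.isIn keyword title) then "audit_closeout"
  else if aKwResource.any (fun keyword => PySem.Str.isIn keyword title) then "resource_related"
  else if aKwExec.any (fun keyword => PySem.Str.isIn keyword title) then "execution_harness"
  else if aKwAuto.any (fun keyword => PySem.Str.isIn keyword title) then "auto_generation"
  else "other"

lemma aStep_eq (cats : PySem.Dict String (List (String × List (String × String))))
    (p : String × List (String × String)) :
    (let title := PySem.Str.lower ((PySem.Dict.mk p.2).getD "title" "")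
     if aKwCritical.any (fun keyword => PySem.Str.isIn keyword title) then
       cats.modify "critical_validation" [] (· ++ [p])
     else if aKwAudit.any (fun keyword => PySem.Str.isIn keyword title) then
       cats.modify "audit_closeout" [] (· ++ [p])
     else if aKwResource.any (fun keyword => PySem.Str.isIn keyword title) then
       cats.modify "resource_related" [] (· ++ [p])
     else if aKwExec.any (fun keyword => PySem.Str.isIn keyword title) then
       cats.modify "execution_harness" [] (· ++ [p])
     else if aKwAuto.any (fun keyword => PySem.Str.isIn keyword title) then
       cats.modify "auto_generation" [] (· ++ [p])
     else cats.modify "other" [] (· ++ [p]))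
    = cats.modify (aKey p.2) [] (· ++ [p]) := by
  unfold aKey
  dsimp only
  split_ifs <;> rfl

lemma aKey_eq_bLabel (td : List (String × String)) : aKey td = bLabel td := by
  unfold aKey bLabel
  simp only [bScan, bTable, aKwCritical, aKwAudit, aKwResource, aKwExec, aKwAuto]
  split_ifs <;> rfl

lemma aKey_mem (td : List (String × String)) :
    PySem.Set.contains ["critical_validation", "audit_closeout", "resource_related",
      "execution_harness", "auto_generation", "other"] (aKey td) := by
  unfold aKey
  dsimp only
  split_ifs <;> decide

-- value of A's category dict at a key, after the whole loop
lemma getD_foldl_aKey (l : List (String × List (String × String)))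
    (d : PySem.Dict String (List (String × List (String × String)))) (c : String) :
    (l.foldl (fun cats p => cats.modify (aKey p.2) [] (· ++ [p])) d).getD c []
      = d.getD c [] ++ l.filter (fun p => aKey p.2 == c) := by
  induction l generalizing d with
  | nil => simp
  | cons p t ih =>
    simp only [List.foldl_cons, ih, List.filter_cons]
    rw [PySem.Dict.getD_modify]
    by_cases h : aKey p.2 = c
    · simp [h]
    · simp [h, beq_iff_eq, Ne.symm h]

lemma set_update_self (s : List String) (xs : List String)
    (h : ∀ x ∈ xs, PySem.Set.contains s x = true) : PySem.Set.update s xs = s := by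
  rw [PySem.Set.update_eq_append_filter]
  have : (PySem.Set.ofList xs).filter (fun y => !(PySem.Set.contains s y)) = [] := by
    apply List.filter_eq_nil_iff.mpr
    intro y hy
    have hc := h y ((PySem.Set.mem_ofList _ _).mp hy)
    simp only [Bool.not_eq_true', Bool.not_eq_false]
    exact hc
  rw [this, List.append_nil]

-- ===== VERDICT (by name: the statement is the Claim_ definition above) =====
theorem categorize_pending_tasks_spec : Claim_equal_categorize_pending_tasks := by
  intro pts _
  unfold Spec_categorize_pending_tasks categorize_pending_tasks categorize_pending_tasks_alt
  dsimp only
  have hstep : (fun (cats : PySem.Dict String (List (String × List (String × String)))) p =>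
      let title := PySem.Str.lower ((PySem.Dict.mk p.2).getD "title" "")
      if aKwCritical.any (fun keyword => PySem.Str.isIn keyword title) then
        cats.modify "critical_validation" [] (· ++ [p])
      else if aKwAudit.any (fun keyword => PySem.Str.isIn keyword title) then
        cats.modify "audit_closeout" [] (· ++ [p])
      else if aKwResource.any (fun keyword => PySem.Str.isIn keyword title) then
        cats.modify "resource_related" [] (· ++ [p])
      else if aKwExec.any (fun keyword => PySem.Str.isIn keyword title) then
        cats.modify "execution_harness" [] (· ++ [p])
      else if aKwAuto.any (fun keyword => PySem.Str.isIn keyword title) then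
        cats.modify "auto_generation" [] (· ++ [p])
      else cats.modify "other" [] (· ++ [p]))
      = (fun cats p => cats.modify (aKey p.2) [] (· ++ [p])) := by
    funext cats p
    exact aStep_eq cats p
  rw [hstep]
  set D0 : PySem.Dict String (List (String × List (String × String))) :=
    PySem.Dict.mk [("critical_validation", []), ("audit_closeout", []), ("resource_related", []),
                   ("execution_harness", []), ("auto_generation", []), ("other", [])] with hD0
  set D := pts.foldl (fun cats p => cats.modify (aKey p.2) [] (· ++ [p])) D0 with hD
  have hkeys : D.keys = ["critical_validation", "audit_closeout", "resource_related",
      "execution_harness", "auto_generation", "other"] := by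
    rw [hD, PySem.Dict.keys_foldl_modify_key]
    have h0 : D0.keys = ["critical_validation", "audit_closeout", "resource_related",
        "execution_harness", "auto_generation", "other"] := by rw [hD0]; rfl
    rw [h0, set_update_self]
    intro x hx
    obtain ⟨p, _, rfl⟩ := List.mem_map.mp hx
    exact aKey_mem p.2
  have hnd : D.keys.Nodup := by rw [hkeys]; decide
  rw [PySem.Dict.items_eq_map_keys D hnd [], hkeys]
  have hval : ∀ c, D.getD c [] = D0.getD c [] ++ pts.filter (fun p => aKey p.2 == c) := by
    intro c
    rw [hD]
    exact getD_foldl_aKey pts D0 c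
  have halt : ∀ n : String,
      ((pts.map (fun p => (bLabel p.2, p))).filter (fun q => q.1 == n)).map (·.2)
        = pts.filter (fun p => aKey p.2 == n) := by
    intro n
    rw [List.filter_map, List.map_map]
    simp only [Function.comp_def, aKey_eq_bLabel]
    exact List.map_id _
  simp only [List.map_cons, List.map_nil, bOrder, bTable, hval, halt]
  rfl
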